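-- pv_equiv track=rewrite | github.com/mungikwon/coding_study | BAEKJOON_12100.py | line_play
-- ===== SOURCE A (Python) =====
-- def line_play(k):
--     a=[0]*len(k)
--     result=[]
--     for i in range(len(k)-1):
--         for j in range(i+1,len(k)):
--             if k[j]!=0 and k[j]!=k[i]:
--                 break
--             if k[i]!=0 and k[i]==k[j]:
--                 a[i]=k[i]+k[j]
--                 k[i]=0
--                 k[j]=0
--                 break
--     for i in range(len(k)):
--         if a[i]!=0:
--             result.append(a[i])
--         elif k[i]!=0:
--             result.append(k[i])
--     for _ in range(len(k)-len(result)):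
--         result.append(0)
--     return result
-- ===== SOURCE B (Python) =====
-- def line_play(k):
--     # Single pass: compress out zeros, then merge adjacent equal tiles once
--     # each, then pad with zeros. (Unlike A, does not mutate k.)
--     nz = [x for x in k if x != 0]
--     out = []
--     i = 0
--     while i < len(nz):
--         if i + 1 < len(nz) and nz[i] == nz[i + 1]:
--             out.append(nz[i] * 2)
--             i += 2
--         else:
--             out.append(nz[i])
--             i += 1
--     return out + [0] * (len(k) - len(out))
-- ===== Notes on version B (the rewrite author's own statement) =====
-- stated objective: alternative
-- what changed: Replaces A's nested index scans with in-place zeroing by a single pass: filter out zeros, merge adjacent equal neighbours once, pad with zeros (B does not mutate the argument).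
import Mathlib
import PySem

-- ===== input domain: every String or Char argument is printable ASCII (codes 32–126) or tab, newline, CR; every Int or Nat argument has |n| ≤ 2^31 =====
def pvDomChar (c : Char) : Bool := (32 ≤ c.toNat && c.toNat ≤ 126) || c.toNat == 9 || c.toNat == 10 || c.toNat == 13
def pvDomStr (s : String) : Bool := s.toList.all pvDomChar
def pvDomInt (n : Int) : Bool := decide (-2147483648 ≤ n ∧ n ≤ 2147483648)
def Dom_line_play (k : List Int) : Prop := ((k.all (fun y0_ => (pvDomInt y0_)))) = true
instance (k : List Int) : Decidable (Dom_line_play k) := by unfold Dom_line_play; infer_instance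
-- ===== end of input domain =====

-- B replaces A's nested index scans and in-place zeroing with one compress-then-merge
-- pass; the equivalence is about the RETURN value only: A mutates its argument list, B does not.

-- ===== PORT A =====
-- A's inner 'for j in range(i+1, len(k))' loop, scanning the suffix after k[i]:
-- a 'break' without a merge is none; a merge returns (k[i]+k[j], suffix with k[j]:=0).
def pvInner (x : Int) : List Int → Option (Int × List Int)
  | [] => none
  | y :: t =>
    if y ≠ 0 ∧ y ≠ x then none
    else if x ≠ 0 ∧ x = y then some (x + y, 0 :: t)
    else (pvInner x t).map (fun p => (p.1, y :: p.2))

-- needed for pvOuter's termination: a merge keeps the suffix length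
theorem pvInner_length (x : Int) (s : List Int) (m : Int) (s' : List Int)
    (h : pvInner x s = some (m, s')) : s'.length = s.length := by
  induction s generalizing m s' with
  | nil => simp [pvInner] at h
  | cons y t ih =>
    simp only [pvInner] at h
    split at h
    · exact absurd h (by simp)
    · split at h
      · cases h; rfl
      · cases hI : pvInner x t with
        | none => rw [hI] at h; simp at h
        | some p =>
          rw [hI] at h
          cases p with
          | mk m' t' =>
            simp only [Option.map_some, Option.some.injEq, Prod.mk.injEq] at h
            cases h.2
            simp [ih m' t' hI]

-- A's outer 'for i in range(len(k)-1)' loop over the mutable state (a, k):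
-- position by position it yields (a[i], final k[i]) and continues on the
-- (possibly merge-updated) suffix.
def pvOuter : List Int → List (Int × Int)
  | [] => []
  | x :: s =>
    match _h : pvInner x s with
    | none => (0, x) :: pvOuter s
    | some (m, s') => (m, 0) :: pvOuter s'
termination_by l => l.length
decreasing_by
  · simp
  · simp [pvInner_length x s m s' _h]

def line_play (k : List Int) : List Int :=
  -- result: for i, append a[i] if nonzero, elif k[i] != 0 append k[i]
  let result := (pvOuter k).filterMap
    (fun p => if p.1 ≠ 0 then some p.1 else if p.2 ≠ 0 then some p.2 else none)
  -- for _ in range(len(k) - len(result)): result.append(0)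
  result ++ List.replicate (k.length - result.length) 0

-- ===== PORT B =====
-- Source B's while loop over the compressed list: merge adjacent equal neighbours once
def pvMerge : List Int → List Int
  | [] => []
  | [x] => [x]
  | x :: y :: t => if x = y then x * 2 :: pvMerge t else x :: pvMerge (y :: t)

def line_play_alt (k : List Int) : List Int :=
  let nz := k.filter (fun x => x != 0)
  let out := pvMerge nz
  out ++ List.replicate (k.length - out.length) 0

-- ===== PRECONDITION & SPEC =====
def Spec_line_play (k : List Int) (out : List Int) : Prop := out = line_play_alt k
instance (k : List Int) (out : List Int) : Decidable (Spec_line_play k out) := by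
  unfold Spec_line_play; infer_instance

-- ===== CLAIM (what is proved, stated in full; the proofs are below) =====
def Claim_equal_line_play : Prop := ∀ (k : List Int), Dom_line_play k → Spec_line_play k (line_play k)

-- ===== LEMMAS AND PROOFS =====

-- unfolding equations for pvOuter (well-founded recursion hides them)
theorem pvOuter_cons_none (x : Int) (s : List Int) (h : pvInner x s = none) :
    pvOuter (x :: s) = (0, x) :: pvOuter s := by
  rw [pvOuter, h]

theorem pvOuter_cons_some (x : Int) (s : List Int) (m : Int) (s' : List Int)
    (h : pvInner x s = some (m, s')) :
    pvOuter (x :: s) = (m, 0) :: pvOuter s' := by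
  rw [pvOuter, h]

-- scanning from a zero cell never merges (the first nonzero it meets breaks)
theorem pvInner_zero (s : List Int) : pvInner 0 s = none := by
  induction s with
  | nil => rfl
  | cons y t ih =>
    by_cases hy : y = 0
    · subst hy; simp [pvInner, ih]
    · simp [pvInner, hy]

-- what A's inner scan does, read off the compressed suffix: it merges iff the
-- first nonzero element after x equals x, and then zeroes exactly that element
theorem pvInner_char (x : Int) (hx : x ≠ 0) (s : List Int) :
    (s.filter (fun z => z != 0) = [] → pvInner x s = none) ∧
    (∀ y t, s.filter (fun z => z != 0) = y :: t →
      (y ≠ x → pvInner x s = none) ∧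
      (y = x → ∃ s', pvInner x s = some (x + x, s') ∧
        s'.filter (fun z => z != 0) = t)) := by
  induction s with
  | nil => simp [pvInner]
  | cons z s ih =>
    by_cases hz : z = 0
    · subst hz
      simp only [List.filter_cons, bne_self_eq_false, Bool.false_eq_true, if_false]
      refine ⟨fun h => ?_, fun y t h => ?_⟩
      · simp [pvInner, hx, (ih.1 h)]
      · refine ⟨fun hyx => ?_, fun hyx => ?_⟩
        · simp [pvInner, hx, ((ih.2 y t h).1 hyx)]
        · obtain ⟨s', hs', hf⟩ := (ih.2 y t h).2 hyx
          refine ⟨0 :: s', ?_, by simpa using hf⟩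
          simp [pvInner, hx, hs']
    · simp only [List.filter_cons, bne_iff_ne, ne_eq, hz, not_false_eq_true, if_true]
      refine ⟨fun h => by simp at h, fun y t h => ?_⟩
      obtain ⟨rfl, rfl⟩ := List.cons_eq_cons.mp h
      refine ⟨fun hyx => ?_, fun hyx => ?_⟩
      · simp [pvInner, hz, hyx]
      · subst hyx
        exact ⟨0 :: s, by simp [pvInner, hx], by simp⟩

-- the collected (a[i], k[i]) pairs print exactly the compress-and-merge of k
theorem pvOuter_core (n : Nat) (k : List Int) (hn : k.length ≤ n) :
    (pvOuter k).filterMap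
      (fun p => if p.1 ≠ 0 then some p.1 else if p.2 ≠ 0 then some p.2 else none)
    = pvMerge (k.filter (fun z => z != 0)) := by
  induction n generalizing k with
  | zero =>
    have : k = [] := List.length_eq_zero_iff.mp (Nat.le_zero.mp hn)
    subst this; simp [pvOuter, pvMerge]
  | succ n ih =>
    cases k with
    | nil => simp [pvOuter, pvMerge]
    | cons x s =>
      by_cases hx : x = 0
      · subst hx
        rw [pvOuter_cons_none 0 s (pvInner_zero s)]
        simpa using ih s (by simpa using hn)
      · have hchar := pvInner_char x hx s
        cases hf : s.filter (fun z => z != 0) with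
        | nil =>
          rw [pvOuter_cons_none x s (hchar.1 hf)]
          simp only [List.filter_cons, bne_iff_ne, ne_eq, hx, not_false_eq_true, if_true, hf]
          rw [List.filterMap_cons]
          simp only [not_true_eq_false, reduceIte, hx, not_false_eq_true, if_true]
          rw [ih s (by simpa using hn), hf]
          rfl
        | cons y t =>
          by_cases hyx : y = x
          · subst hyx
            obtain ⟨s', hs', hfs'⟩ := (hchar.2 y t hf).2 rfl
            rw [pvOuter_cons_some y s (y + y) s' hs']
            rw [List.filterMap_cons]
            have hyy : y + y ≠ 0 := by omega
            simp only [ne_eq, hyy, not_false_eq_true, if_true]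
            have hlen : s'.length ≤ n := by
              rw [pvInner_length y s (y + y) s' hs']; simpa using hn
            rw [ih s' hlen, hfs']
            simp only [List.filter_cons, bne_iff_ne, ne_eq, hx, not_false_eq_true,
              if_true, hf, pvMerge]
            congr 1
            omega
          · rw [pvOuter_cons_none x s ((hchar.2 y t hf).1 hyx)]
            rw [List.filterMap_cons]
            simp only [ne_eq, not_true_eq_false, reduceIte, hx, not_false_eq_true, if_true]
            rw [ih s (by simpa using hn), hf]
            simp only [List.filter_cons, bne_iff_ne, ne_eq, hx, not_false_eq_true,
              if_true, hf, pvMerge]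
            rw [if_neg (fun (h : x = y) => hyx h.symm)]

-- ===== VERDICT (by name: the statement is the Claim_ definition above) =====
theorem line_play_spec : Claim_equal_line_play := by
  intro k _
  unfold Spec_line_play line_play line_play_alt
  simp only [pvOuter_core k.length k le_rfl]
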